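-- pv_equiv track=rewrite | github.com/Woseseltops/fowlt | confusible_trainer/confusible_trainer.py | add_three_words_right
-- ===== SOURCE A (Python) =====
-- def add_three_words_right(lines,nl):
--     wordpointer = 0;
--     linepointer = 1;
--     next_line = [];
--
--     while len(next_line) < 3:
--
--         words_to_investigate = lines[nl + linepointer].replace('\n','').split(' ');
--
--         if len(words_to_investigate) == wordpointer:
--             linepointer+= 1;
--             words_to_investigate = lines[nl + linepointer].replace('\n','').split(' ');
--             wordpointer = 0;
--
--         next_line.append(words_to_investigate[wordpointer]);
--         wordpointer += 1;
--
--     return next_line;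
-- ===== SOURCE B (Python) =====
-- def add_three_words_right(lines, nl):
--     result = []
--     offset = 1
--     while True:
--         words = lines[nl + offset].replace('\n', '').split(' ')
--         for word in words:
--             result.append(word)
--             if len(result) == 3:
--                 return result
--         offset += 1
-- ===== Notes on version B (the rewrite author's own statement) =====
-- stated objective: simpler
-- what changed: A's wordpointer/linepointer state machine with an explicit 'line exhausted, advance and reset' branch is replaced by plain nested loops: for each following line, append its words one by one and return as soon as three are collected.
import Mathlib
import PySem

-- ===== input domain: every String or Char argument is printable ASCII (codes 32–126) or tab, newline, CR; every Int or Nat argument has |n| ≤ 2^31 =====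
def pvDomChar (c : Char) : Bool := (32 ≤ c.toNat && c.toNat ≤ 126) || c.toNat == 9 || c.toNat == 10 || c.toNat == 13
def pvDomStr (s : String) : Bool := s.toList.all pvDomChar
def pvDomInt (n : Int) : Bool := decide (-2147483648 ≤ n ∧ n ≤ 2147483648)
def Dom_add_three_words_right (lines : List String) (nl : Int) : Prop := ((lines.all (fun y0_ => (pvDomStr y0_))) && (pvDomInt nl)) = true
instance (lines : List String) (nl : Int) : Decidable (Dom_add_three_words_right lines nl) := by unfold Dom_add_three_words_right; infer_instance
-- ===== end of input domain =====

-- B replaces A's wordpointer/linepointer arithmetic with plain nested loops (per line, per word,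
-- stop at three words); equivalence of the return values is proved on Pre_ (where A returns).

-- ===== PORT A =====
-- shared by both ports: line.replace('\n','').split(' ') — split? is `some` since the separator " " is nonempty
def pvLineWords (s : String) : List String :=
  (PySem.Str.split? (PySem.Str.replace s "\n" "") " ").getD []

-- the while loop appends exactly one word per iteration, so `3 - len(next_line)` iterations remain:
-- that count is the recursion fuel; pyGet? = none is Python's IndexError (excluded by Pre_)
def aGo (lines : List String) (nl : Int) : Nat → Int → Int → List String → List String
  | 0, _, _, next_line => next_line
  | n + 1, wordpointer, linepointer, next_line =>
    match PySem.List.pyGet? lines (nl + linepointer) with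
    | none => next_line
    | some line =>
      let words_to_investigate := pvLineWords line
      if (words_to_investigate.length : Int) = wordpointer then
        match PySem.List.pyGet? lines (nl + (linepointer + 1)) with
        | none => next_line
        | some line2 =>
          let words2 := pvLineWords line2
          match PySem.List.pyGet? words2 (0 : Int) with
          | none => next_line
          | some w => aGo lines nl n 1 (linepointer + 1) (next_line ++ [w])
      else
        match PySem.List.pyGet? words_to_investigate wordpointer with
        | none => next_line
        | some w => aGo lines nl n (wordpointer + 1) linepointer (next_line ++ [w])

def add_three_words_right (lines : List String) (nl : Int) : List String :=
  aGo lines nl 3 0 1 []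

-- ===== PORT B =====
-- inner `for word in words` loop: .inl = early `return result`, .inr = loop fell through
def bTake : List String → List String → (List String) ⊕ (List String)
  | [], result => .inr result
  | word :: rest, result =>
    let result' := result ++ [word]
    if result'.length = 3 then .inl result' else bTake rest result'

-- outer `while True` loop; each pass adds at least one word, so fuel 3 is never exhausted
-- before the return; pyGet? = none is Python's IndexError (excluded by Pre_)
def bGo (lines : List String) (nl : Int) : Nat → Int → List String → List String
  | 0, _, result => result
  | fuel + 1, offset, result =>
    match PySem.List.pyGet? lines (nl + offset) with
    | none => result
    | some line =>
      match bTake (pvLineWords line) result with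
      | .inl done => done
      | .inr result' => bGo lines nl fuel (offset + 1) result'

def add_three_words_right_alt (lines : List String) (nl : Int) : List String :=
  bGo lines nl 3 1 []

-- ===== PRECONDITION & SPEC =====
-- Exactly the inputs on which A returns: line nl+1 exists (Python indexing, negative from the end),
-- and either it has ≥ 3 words, or line nl+2 exists and those two lines have ≥ 3 words together,
-- or line nl+3 exists (each line yields ≥ 1 word, so three lines always suffice).
def Pre_add_three_words_right (lines : List String) (nl : Int) : Prop :=
  PySem.Raise.InRange lines.length (nl + 1) ∧
  (3 ≤ (pvLineWords (PySem.List.pyGetD lines (nl + 1) "")).length ∨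
   (PySem.Raise.InRange lines.length (nl + 2) ∧
    (3 ≤ (pvLineWords (PySem.List.pyGetD lines (nl + 1) "")).length
       + (pvLineWords (PySem.List.pyGetD lines (nl + 2) "")).length ∨
     PySem.Raise.InRange lines.length (nl + 3))))
instance (lines : List String) (nl : Int) : Decidable (Pre_add_three_words_right lines nl) := by
  unfold Pre_add_three_words_right; infer_instance

def pvWitness_add_three_words_right : List String × Int := (["x", "a b c"], 0)

def Spec_add_three_words_right (lines : List String) (nl : Int) (out : List String) : Prop := out = add_three_words_right_alt lines nl
instance (lines : List String) (nl : Int) (out : List String) : Decidable (Spec_add_three_words_right lines nl out) := by unfold Spec_add_three_words_right; infer_instance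

-- ===== CLAIM (what is proved, stated in full; the proofs are below) =====
def Claim_equal_add_three_words_right : Prop := ∀ (lines : List String) (nl : Int), Dom_add_three_words_right lines nl → Pre_add_three_words_right lines nl → Spec_add_three_words_right lines nl (add_three_words_right lines nl)

-- ===== LEMMAS AND PROOFS =====

lemma splitOn_go_ne_nil (sep : List Char) (fuel : Nat) (l cur : List Char) (acc : List (List Char)) :
    PySem.Chars.splitOn.go sep fuel l cur acc ≠ [] := by
  induction fuel generalizing l cur acc with
  | zero => simp [PySem.Chars.splitOn.go]
  | succ n ih =>
    cases l with
    | nil => simp [PySem.Chars.splitOn.go]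
    | cons c rest =>
      rw [PySem.Chars.splitOn.go]
      split <;> exact ih _ _ _

lemma pvLineWords_ne_nil (s : String) : pvLineWords s ≠ [] := by
  simp [pvLineWords, PySem.Str.split?, PySem.Chars.split?, PySem.Chars.splitOn]
  exact splitOn_go_ne_nil _ _ _ _ _

-- ===== VERDICT (by name: the statement is the Claim_ definition above) =====
lemma pvGetSome {α : Type} (xs : List α) (i : Int) (h : PySem.Raise.InRange xs.length i) :
    ∃ x, PySem.List.pyGet? xs i = some x := by
  cases hh : PySem.List.pyGet? xs i with
  | none => rw [PySem.List.pyGet?_eq_none_iff] at hh; exact absurd h hh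
  | some x => exact ⟨x, rfl⟩

lemma pvCons (s : String) : ∃ w t, pvLineWords s = w :: t := by
  cases h : pvLineWords s with
  | nil => exact absurd h (pvLineWords_ne_nil s)
  | cons a b => exact ⟨a, b, rfl⟩

lemma pvIdx0 {α : Type} (a : α) (r : List α) : PySem.List.pyGet? (a :: r) (0 : Int) = some a := by
  simp [PySem.List.pyGet?, PySem.List.pyIdx?]

lemma pvIdx1 {α : Type} (a b : α) (r : List α) : PySem.List.pyGet? (a :: b :: r) (1 : Int) = some b := by
  simp [PySem.List.pyGet?, PySem.List.pyIdx?]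

lemma pvIdx2 {α : Type} (a b c : α) (r : List α) : PySem.List.pyGet? (a :: b :: c :: r) (2 : Int) = some c := by
  simp [PySem.List.pyGet?, PySem.List.pyIdx?]
  rw [if_pos (by omega)]
  simp

lemma aGo_take (lines : List String) (nl : Int) (n : Nat) (wp lp : Int) (acc : List String)
    (line : String) (w : String)
    (hg : PySem.List.pyGet? lines (nl + lp) = some line)
    (hne : ((pvLineWords line).length : Int) ≠ wp)
    (hidx : PySem.List.pyGet? (pvLineWords line) wp = some w) :
    aGo lines nl (n + 1) wp lp acc = aGo lines nl n (wp + 1) lp (acc ++ [w]) := by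
  rw [aGo, hg]
  simp only [if_neg hne, hidx]

lemma aGo_adv (lines : List String) (nl : Int) (n : Nat) (wp lp : Int) (acc : List String)
    (line line2 : String) (w : String)
    (hg : PySem.List.pyGet? lines (nl + lp) = some line)
    (heq : ((pvLineWords line).length : Int) = wp)
    (hg2 : PySem.List.pyGet? lines (nl + (lp + 1)) = some line2)
    (hidx : PySem.List.pyGet? (pvLineWords line2) (0 : Int) = some w) :
    aGo lines nl (n + 1) wp lp acc = aGo lines nl n 1 (lp + 1) (acc ++ [w]) := by
  rw [aGo, hg]
  simp only [if_pos heq, hg2, hidx]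

lemma bGo_done (lines : List String) (nl : Int) (f : Nat) (off : Int) (res d : List String)
    (line : String)
    (hg : PySem.List.pyGet? lines (nl + off) = some line)
    (hT : bTake (pvLineWords line) res = .inl d) :
    bGo lines nl (f + 1) off res = d := by
  rw [bGo, hg]
  simp only [hT]

lemma bGo_next (lines : List String) (nl : Int) (f : Nat) (off : Int) (res res' : List String)
    (line : String)
    (hg : PySem.List.pyGet? lines (nl + off) = some line)
    (hT : bTake (pvLineWords line) res = .inr res') :
    bGo lines nl (f + 1) off res = bGo lines nl f (off + 1) res' := by
  rw [bGo, hg]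
  simp only [hT]

theorem add_three_words_right_spec : Claim_equal_add_three_words_right := by
  intro lines nl _dom hpre
  unfold Spec_add_three_words_right add_three_words_right add_three_words_right_alt
  obtain ⟨h1, hrest⟩ := hpre
  obtain ⟨l1, hg1⟩ := pvGetSome lines (nl + 1) h1
  have hd1 : PySem.List.pyGetD lines (nl + 1) "" = l1 := by simp [PySem.List.pyGetD, hg1]
  rw [hd1] at hrest
  obtain ⟨w, t, hw1⟩ := pvCons l1
  rw [hw1] at hrest
  match t, hw1, hrest with
  | c1 :: c2 :: r, hw1, _ =>
    rw [aGo_take lines nl 2 0 1 [] l1 w hg1 (by rw [hw1]; simp; omega) (by rw [hw1]; exact pvIdx0 _ _)]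
    rw [aGo_take lines nl 1 (0+1) 1 _ l1 c1 hg1 (by rw [hw1]; simp; omega) (by rw [hw1]; exact pvIdx1 _ _ _)]
    rw [aGo_take lines nl 0 (0+1+1) 1 _ l1 c2 hg1 (by rw [hw1]; simp; omega) (by rw [hw1]; exact pvIdx2 _ _ _ _)]
    rw [bGo_done lines nl 2 1 [] [w, c1, c2] l1 hg1 (by rw [hw1]; simp [bTake])]
    simp [aGo]
  | [c1], hw1, hrest =>
    rcases hrest with habs | ⟨h2, _⟩
    · simp at habs
    obtain ⟨l2, hg2⟩ := pvGetSome lines (nl + 2) h2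
    have hg2' : PySem.List.pyGet? lines (nl + (1 + 1)) = some l2 := by
      rw [show nl + (1 + 1) = nl + 2 by ring]; exact hg2
    obtain ⟨u, t2, hw2⟩ := pvCons l2
    rw [aGo_take lines nl 2 0 1 [] l1 w hg1 (by rw [hw1]; simp) (by rw [hw1]; exact pvIdx0 _ _)]
    rw [aGo_take lines nl 1 (0+1) 1 _ l1 c1 hg1 (by rw [hw1]; simp) (by rw [hw1]; exact pvIdx1 _ _ _)]
    rw [aGo_adv lines nl 0 (0+1+1) 1 _ l1 l2 u hg1 (by rw [hw1]; simp) hg2' (by rw [hw2]; exact pvIdx0 _ _)]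
    rw [bGo_next lines nl 2 1 [] [w, c1] l1 hg1 (by rw [hw1]; simp [bTake])]
    rw [bGo_done lines nl 1 (1+1) [w, c1] [w, c1, u] l2 hg2' (by rw [hw2]; simp [bTake])]
    simp [aGo]
  | [], hw1, hrest =>
    rcases hrest with habs | ⟨h2, hrest2⟩
    · simp at habs
    obtain ⟨l2, hg2⟩ := pvGetSome lines (nl + 2) h2
    have hg2' : PySem.List.pyGet? lines (nl + (1 + 1)) = some l2 := by
      rw [show nl + (1 + 1) = nl + 2 by ring]; exact hg2
    have hd2 : PySem.List.pyGetD lines (nl + 2) "" = l2 := by simp [PySem.List.pyGetD, hg2]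
    rw [hd2] at hrest2
    obtain ⟨u, t2, hw2⟩ := pvCons l2
    rw [hw2] at hrest2
    rw [aGo_take lines nl 2 0 1 [] l1 w hg1 (by rw [hw1]; simp) (by rw [hw1]; exact pvIdx0 _ _)]
    rw [aGo_adv lines nl 1 (0+1) 1 _ l1 l2 u hg1 (by rw [hw1]; simp) hg2' (by rw [hw2]; exact pvIdx0 _ _)]
    rw [bGo_next lines nl 2 1 [] [w] l1 hg1 (by rw [hw1]; simp [bTake])]
    match t2, hw2, hrest2 with
    | c :: r2, hw2, _ =>
      rw [aGo_take lines nl 0 1 (1+1) _ l2 c hg2' (by rw [hw2]; simp; omega) (by rw [hw2]; exact pvIdx1 _ _ _)]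
      rw [bGo_done lines nl 1 (1+1) [w] [w, u, c] l2 hg2' (by rw [hw2]; simp [bTake])]
      simp [aGo]
    | [], hw2, hrest2 =>
      rcases hrest2 with habs2 | h3
      · simp at habs2
      obtain ⟨l3, hg3⟩ := pvGetSome lines (nl + 3) h3
      have hg3' : PySem.List.pyGet? lines (nl + (1 + 1 + 1)) = some l3 := by
        rw [show nl + (1 + 1 + 1) = nl + 3 by ring]; exact hg3
      obtain ⟨v, t3, hw3⟩ := pvCons l3
      rw [aGo_adv lines nl 0 1 (1+1) _ l2 l3 v hg2' (by rw [hw2]; simp) hg3' (by rw [hw3]; exact pvIdx0 _ _)]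
      rw [bGo_next lines nl 1 (1+1) [w] [w, u] l2 hg2' (by rw [hw2]; simp [bTake])]
      rw [bGo_done lines nl 0 (1+1+1) [w, u] [w, u, v] l3 hg3' (by rw [hw3]; simp [bTake])]
      simp [aGo]
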